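-- pv_equiv track=rewrite | github.com/MKolman/AdventOfCode2019 | day_22.py | reverse_shuffle
-- ===== SOURCE A (Python) =====
-- def reverse_shuffle(inp, a, m, N):
--   command, num = inp.pop()
--   if len(inp):
--     a, m = reverse_shuffle(inp, a, m, N)
--
--   if command == 'reverse':
--     m *= -1
--     a += m
--   elif command == 'cut':
--     a += num * m
--   elif command == 'deal':
--     m *= pow(num, -1, N)
--
--   return a, m
-- ===== SOURCE B (Python) =====
-- def reverse_shuffle(inp, a, m, N):
--   # Iterative single forward pass over the commands instead of A's pop-and-recurse.
--   # Like A, empties inp; unlike A, returns (a, m) unchanged on an empty list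
--   # (A raises IndexError there - excluded by Pre_ / documented in Raises_).
--   for command, num in inp:
--     if command == 'reverse':
--       m = -m
--       a += m
--     elif command == 'cut':
--       a += num * m
--     elif command == 'deal':
--       m *= pow(num, -1, N)
--   inp.clear()
--   return a, m
-- ===== Notes on version B (the rewrite author's own statement) =====
-- stated objective: simpler
-- what changed: Replaces A's pop-from-the-end recursion (one stack frame per command) with a single iterative forward fold over the command list keeping accumulators (a, m).
-- crash fix: On an empty command list A raises IndexError (inp.pop() on []); B returns (a, m) unchanged. — e.g. on reverse_shuffle([], 0, 1, 10): A raises IndexError, B returns (0, 1)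
import Mathlib
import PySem

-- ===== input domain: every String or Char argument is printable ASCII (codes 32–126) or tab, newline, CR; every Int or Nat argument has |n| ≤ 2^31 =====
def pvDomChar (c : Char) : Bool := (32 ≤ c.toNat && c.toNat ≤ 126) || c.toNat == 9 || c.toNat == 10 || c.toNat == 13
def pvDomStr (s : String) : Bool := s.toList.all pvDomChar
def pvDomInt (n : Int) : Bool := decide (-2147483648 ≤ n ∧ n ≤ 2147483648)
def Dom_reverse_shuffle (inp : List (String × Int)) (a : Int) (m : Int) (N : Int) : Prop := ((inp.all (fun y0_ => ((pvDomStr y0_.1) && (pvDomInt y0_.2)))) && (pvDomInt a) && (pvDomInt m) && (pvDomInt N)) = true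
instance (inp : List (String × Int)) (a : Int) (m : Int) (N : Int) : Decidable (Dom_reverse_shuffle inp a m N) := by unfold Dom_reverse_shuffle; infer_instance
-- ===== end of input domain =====

-- B replaces A's pop-from-the-end recursion by a single forward foldl over the commands
-- (simpler, constant space); equivalence is about the RETURN value — both Pythons empty inp.


-- pow(num, -1, N): Python's modular inverse, exact whenever Python returns
-- (i.e. N ≠ 0 and gcd(num, N) = 1, which Pre_ guarantees): Bézout coefficient reduced
-- with Python's sign-of-divisor mod.
def pyInvMod (b N : Int) : Int := PySem.Int.mod (Int.gcdA b N) N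

-- ===== PORT A =====
def reverse_shuffle (inp : List (String × Int)) (a : Int) (m : Int) (N : Int) : Int × Int :=
  match h : inp.getLast? with
  | none => (a, m)  -- Python raises IndexError here (inp.pop() on []); excluded by Pre_
  | some (command, num) =>
    let rest := inp.dropLast
    let (a, m) := if rest.length ≠ 0 then reverse_shuffle rest a m N else (a, m)
    if command == "reverse" then
      let m := m * (-1)
      (a + m, m)
    else if command == "cut" then (a + num * m, m)
    else if command == "deal" then (a, m * pyInvMod num N)
    else (a, m)
termination_by inp.length
decreasing_by
  simp only [List.length_dropLast]
  have : inp ≠ [] := by intro hn; simp [hn] at h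
  have := List.length_pos_iff.mpr this
  omega

-- ===== PORT B =====
def reverse_shuffle_alt (inp : List (String × Int)) (a : Int) (m : Int) (N : Int) : Int × Int :=
  inp.foldl
    (fun p cn =>
      if cn.1 == "reverse" then (p.1 + -p.2, -p.2)
      else if cn.1 == "cut" then (p.1 + cn.2 * p.2, p.2)
      else if cn.1 == "deal" then (p.1, p.2 * pyInvMod cn.2 N)
      else p)
    (a, m)

-- ===== PRECONDITION & SPEC =====
-- Pre_: exactly where Python A returns normally — a nonempty command list (inp.pop() raises
-- IndexError on []) and every 'deal' step has an invertible multiplier (pow(num,-1,N)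
-- raises ValueError otherwise).
def Pre_reverse_shuffle (inp : List (String × Int)) (a : Int) (m : Int) (N : Int) : Prop :=
  inp ≠ [] ∧ ∀ p ∈ inp, p.1 = "deal" → N ≠ 0 ∧ Int.gcd p.2 N = 1
instance (inp : List (String × Int)) (a : Int) (m : Int) (N : Int) : Decidable (Pre_reverse_shuffle inp a m N) := by unfold Pre_reverse_shuffle; infer_instance

def pvWitness_reverse_shuffle : (List (String × Int)) × Int × Int × Int :=
  ([("reverse", 0), ("cut", 3), ("deal", 3)], 0, 1, 10)

-- On an empty command list A raises IndexError (inp.pop() on []); B returns (a, m) unchanged.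
def Raises_reverse_shuffle (inp : List (String × Int)) (a : Int) (m : Int) (N : Int) : Prop :=
  inp = []
instance (inp : List (String × Int)) (a : Int) (m : Int) (N : Int) : Decidable (Raises_reverse_shuffle inp a m N) := by unfold Raises_reverse_shuffle; infer_instance
def pvRaiseWitness_reverse_shuffle : (List (String × Int)) × Int × Int × Int := ([], 0, 1, 10)
def pvRaiseWitnessOut_reverse_shuffle : Int × Int := (0, 1)

def Spec_reverse_shuffle (inp : List (String × Int)) (a : Int) (m : Int) (N : Int) (out : Int × Int) : Prop := out = reverse_shuffle_alt inp a m N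
instance (inp : List (String × Int)) (a : Int) (m : Int) (N : Int) (out : Int × Int) : Decidable (Spec_reverse_shuffle inp a m N out) := by unfold Spec_reverse_shuffle; infer_instance

-- ===== CLAIM (what is proved, stated in full; the proofs are below) =====
def Claim_equal_reverse_shuffle : Prop := ∀ (inp : List (String × Int)) (a : Int) (m : Int) (N : Int), Dom_reverse_shuffle inp a m N → Pre_reverse_shuffle inp a m N → Spec_reverse_shuffle inp a m N (reverse_shuffle inp a m N)
def Claim_raises_reverse_shuffle : Prop := (∀ (inp : List (String × Int)) (a : Int) (m : Int) (N : Int), Dom_reverse_shuffle inp a m N → Raises_reverse_shuffle inp a m N → ¬ Pre_reverse_shuffle inp a m N) ∧ (Dom_reverse_shuffle (pvRaiseWitness_reverse_shuffle.1) (pvRaiseWitness_reverse_shuffle.2.1) (pvRaiseWitness_reverse_shuffle.2.2.1) (pvRaiseWitness_reverse_shuffle.2.2.2) ∧ Raises_reverse_shuffle (pvRaiseWitness_reverse_shuffle.1) (pvRaiseWitness_reverse_shuffle.2.1) (pvRaiseWitness_reverse_shuffle.2.2.1) (pvRaiseWitness_reverse_shuffle.2.2.2) ∧ reverse_shuffle_alt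 (pvRaiseWitness_reverse_shuffle.1) (pvRaiseWitness_reverse_shuffle.2.1) (pvRaiseWitness_reverse_shuffle.2.2.1) (pvRaiseWitness_reverse_shuffle.2.2.2) = pvRaiseWitnessOut_reverse_shuffle)

-- ===== LEMMAS AND PROOFS =====

-- A's pop-and-recurse equals B's forward fold on EVERY list (both ports return (a, m) on []).
theorem reverse_shuffle_eq_alt (inp : List (String × Int)) (a m N : Int) :
    reverse_shuffle inp a m N = reverse_shuffle_alt inp a m N := by
  induction inp using List.reverseRecOn generalizing a m with
  | nil => simp [reverse_shuffle, reverse_shuffle_alt]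
  | append_singleton xs x ih =>
    rw [reverse_shuffle]
    have hfold : reverse_shuffle_alt (xs ++ [x]) a m N =
        (if x.1 == "reverse" then
          ((reverse_shuffle_alt xs a m N).1 + -(reverse_shuffle_alt xs a m N).2,
            -(reverse_shuffle_alt xs a m N).2)
         else if x.1 == "cut" then
          ((reverse_shuffle_alt xs a m N).1 + x.2 * (reverse_shuffle_alt xs a m N).2,
            (reverse_shuffle_alt xs a m N).2)
         else if x.1 == "deal" then
          ((reverse_shuffle_alt xs a m N).1,
            (reverse_shuffle_alt xs a m N).2 * pyInvMod x.2 N)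
         else reverse_shuffle_alt xs a m N) := by
      unfold reverse_shuffle_alt
      rw [List.foldl_append]
      simp only [List.foldl_cons, List.foldl_nil]
    have hpre : (if xs.length ≠ 0 then reverse_shuffle xs a m N else (a, m)) =
        reverse_shuffle_alt xs a m N := by
      by_cases hx : xs = []
      · simp [hx, reverse_shuffle_alt]
      · have : xs.length ≠ 0 := by simpa [List.length_eq_zero_iff] using hx
        simp [this, ih]
    obtain ⟨c, n⟩ := x
    split
    · next heq => simp at heq
    · next command num heq =>
      rw [List.getLast?_concat] at heq
      obtain ⟨hc, hn⟩ : c = command ∧ n = num :=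
        Prod.mk.injEq .. ▸ Option.some.inj heq
      subst hc hn
      simp only [List.dropLast_concat]
      rw [hpre, hfold]
      split_ifs <;> simp_all <;> ring_nf

-- ===== VERDICT (by name: the statement is the Claim_ definition above) =====
theorem reverse_shuffle_spec : Claim_equal_reverse_shuffle := by
  intro inp a m N _ _
  exact reverse_shuffle_eq_alt inp a m N

@[simp]
theorem reverse_shuffle_raises : Claim_raises_reverse_shuffle := by
  unfold Claim_raises_reverse_shuffle
  exact ⟨fun inp a m N _ hr hp => hp.1 hr, by decide⟩
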